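-- pv_equiv track=rewrite | github.com/giantandreas/Tubes-1-Intelegensi-Buatan | src/ai/local_search.py | diagonal_2
-- ===== SOURCE A (Python) =====
-- from typing import Tuple, List
--
-- def diagonal_2(row: int, column: int, position: Tuple[int,int]) -> List[Tuple[int,int]]:
--     result = []
--     if(position[0] < row-position[1]-1):
--         i = 0
--         j = position[1] + position[0]
--         while(i < column and j >= 0):
--             if(i >= 0 and j < row):
--                 result.append([i,j])
--             i+=1
--             j-=1
--     else :
--         j = 0
--         i = position[0] + position[1]
--         while(i >= 0 and j < row):
--             if(i <column and j >= 0):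
--                 result.append([i,j])
--             i-=1
--             j+=1
--     return result
-- ===== SOURCE B (Python) =====
-- from typing import Tuple, List
--
-- def diagonal_2(row: int, column: int, position: Tuple[int, int]) -> List[List[int]]:
--     s = position[0] + position[1]
--     lo = max(0, s - row + 1)
--     hi = min(column - 1, s)
--     cells = [[i, s - i] for i in range(lo, hi + 1)]
--     if position[0] >= row - position[1] - 1:
--         cells.reverse()
--     return cells
-- ===== Notes on version B (the rewrite author's own statement) =====
-- stated objective: simpler
-- what changed: Replaced A's two hand-stepped while-loops (incrementing/decrementing i and j with an in-loop bounds filter) by a closed-form valid-index range lo..hi on the anti-diagonal sum s, one comprehension over it, and a conditional reverse to reproduce the branch-dependent output order; B only visits cells actually emitted, while A steps over every candidate index and filters.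
import Mathlib
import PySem

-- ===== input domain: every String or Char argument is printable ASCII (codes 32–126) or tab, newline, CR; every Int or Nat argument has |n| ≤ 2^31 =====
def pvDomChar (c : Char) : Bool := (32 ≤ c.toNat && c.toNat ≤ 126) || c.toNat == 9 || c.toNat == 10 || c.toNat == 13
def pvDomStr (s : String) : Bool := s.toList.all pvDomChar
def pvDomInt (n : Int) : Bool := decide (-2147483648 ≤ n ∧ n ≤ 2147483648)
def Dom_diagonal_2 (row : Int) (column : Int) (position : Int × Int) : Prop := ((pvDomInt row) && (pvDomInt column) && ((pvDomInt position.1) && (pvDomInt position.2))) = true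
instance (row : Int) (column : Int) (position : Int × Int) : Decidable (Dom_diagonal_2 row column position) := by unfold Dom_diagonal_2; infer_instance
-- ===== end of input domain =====

-- B replaces A's two hand-stepped while-loops (with an in-loop bounds filter) by a
-- closed-form index range and a conditional reverse: objective 'simpler'.

-- ===== PORT A =====
-- first while-loop of A: i ascends, j descends; append [i,j] when i ≥ 0 ∧ j < row
def diagonal_2_loop1 (column row : Int) (i j : Int) (acc : List (List Int)) : List (List Int) :=
  if _h : i < column ∧ 0 ≤ j then
    diagonal_2_loop1 column row (i + 1) (j - 1)
      (if 0 ≤ i ∧ j < row then acc ++ [[i, j]] else acc)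
  else acc
termination_by (j + 1).toNat
decreasing_by omega

-- second while-loop of A: i descends, j ascends; append [i,j] when i < column ∧ j ≥ 0
def diagonal_2_loop2 (column row : Int) (i j : Int) (acc : List (List Int)) : List (List Int) :=
  if _h : 0 ≤ i ∧ j < row then
    diagonal_2_loop2 column row (i - 1) (j + 1)
      (if i < column ∧ 0 ≤ j then acc ++ [[i, j]] else acc)
  else acc
termination_by (row - j).toNat
decreasing_by omega

def diagonal_2 (row : Int) (column : Int) (position : Int × Int) : List (List Int) :=
  if position.1 < row - position.2 - 1 then
    diagonal_2_loop1 column row 0 (position.2 + position.1) []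
  else
    diagonal_2_loop2 column row (position.1 + position.2) 0 []

-- ===== PORT B =====
def diagonal_2_alt (row : Int) (column : Int) (position : Int × Int) : List (List Int) :=
  let s := position.1 + position.2
  let lo := max 0 (s - row + 1)
  let hi := min (column - 1) s
  let cells := (PySem.List.pyRange lo (hi + 1) 1).map (fun i => [i, s - i])
  if position.1 ≥ row - position.2 - 1 then cells.reverse else cells

-- ===== PRECONDITION & SPEC =====
def Spec_diagonal_2 (row : Int) (column : Int) (position : Int × Int) (out : List (List Int)) : Prop := out = diagonal_2_alt row column position
instance (row : Int) (column : Int) (position : Int × Int) (out : List (List Int)) : Decidable (Spec_diagonal_2 row column position out) := by unfold Spec_diagonal_2; infer_instance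

-- ===== CLAIM (what is proved, stated in full; the proofs are below) =====
def Claim_equal_diagonal_2 : Prop := ∀ (row : Int) (column : Int) (position : Int × Int), Dom_diagonal_2 row column position → Spec_diagonal_2 row column position (diagonal_2 row column position)

-- ===== LEMMAS AND PROOFS =====

-- loop1 characterisation: walking i upward with invariant i + j = s produces exactly
-- the cells [k, s - k] for k from max i (s - row + 1) up to min column (s+1) (exclusive).
theorem diagonal_2_loop1_spec (column row : Int) : ∀ (i j : Int) (acc : List (List Int)), 0 ≤ i →
    diagonal_2_loop1 column row i j acc =
      acc ++ (PySem.List.pyRange (max i (i + j - row + 1)) (min column (i + j + 1)) 1).map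
        (fun k => [k, i + j - k]) := by
  intro i j acc
  induction i, j, acc using diagonal_2_loop1.induct column row with
  | case1 i j acc h ih =>
    intro hi
    rw [diagonal_2_loop1, dif_pos h]
    simp only [dite_eq_ite] at ih
    rw [ih (by omega)]
    have hs : i + 1 + (j - 1) = i + j := by omega
    rw [hs]
    by_cases hjr : j < row
    · rw [if_pos ⟨hi, hjr⟩]
      have h1 : max i (i + j - row + 1) = i := by omega
      have h2 : max (i + 1) (i + j - row + 1) = i + 1 := by omega
      rw [h1, h2, PySem.List.pyRange_one_cons (by omega : i < min column (i + j + 1))]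
      simp
    · rw [if_neg (by omega)]
      have h1 : max i (i + j - row + 1) = i + j - row + 1 := by omega
      have h2 : max (i + 1) (i + j - row + 1) = i + j - row + 1 := by omega
      rw [h1, h2]
  | case2 i j acc h =>
    intro hi
    rw [diagonal_2_loop1, dif_neg h]
    rw [PySem.List.pyRange_one_eq_nil (by omega)]
    simp

-- loop2 characterisation: walking i downward with invariant i + j = s produces the
-- same cells in descending-i order, i.e. the reverse of the ascending range.
theorem diagonal_2_loop2_spec (column row : Int) : ∀ (i j : Int) (acc : List (List Int)), 0 ≤ j →
    diagonal_2_loop2 column row i j acc =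
      acc ++ ((PySem.List.pyRange (max 0 (i + j - row + 1)) (min i (column - 1) + 1) 1).map
        (fun k => [k, i + j - k])).reverse := by
  intro i j acc
  induction i, j, acc using diagonal_2_loop2.induct column row with
  | case1 i j acc h ih =>
    intro hj
    rw [diagonal_2_loop2, dif_pos h]
    simp only [dite_eq_ite] at ih
    rw [ih (by omega)]
    have hs : i - 1 + (j + 1) = i + j := by omega
    rw [hs]
    by_cases hic : i < column
    · rw [if_pos ⟨hic, hj⟩]
      have h1 : min i (column - 1) = i := by omega
      have h2 : min (i - 1) (column - 1) = i - 1 := by omega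
      rw [h1, h2]
      have h3 : (i - 1) + 1 = i := by omega
      rw [h3, PySem.List.pyRange_one_succ_right (by omega : max 0 (i + j - row + 1) ≤ i)]
      have h4 : i + j - i = j := by omega
      simp [h4]
    · rw [if_neg (by omega)]
      have h1 : min i (column - 1) = column - 1 := by omega
      have h2 : min (i - 1) (column - 1) = column - 1 := by omega
      rw [h1, h2]
  | case2 i j acc h =>
    intro hj
    rw [diagonal_2_loop2, dif_neg h]
    rw [PySem.List.pyRange_one_eq_nil (by omega)]
    simp

-- ===== VERDICT (by name: the statement is the Claim_ definition above) =====
theorem diagonal_2_spec : Claim_equal_diagonal_2 := by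
  intro row column ⟨p0, p1⟩ _
  unfold Spec_diagonal_2 diagonal_2 diagonal_2_alt
  simp only
  by_cases hb : p0 < row - p1 - 1
  · rw [if_pos hb, if_neg (by omega)]
    rw [diagonal_2_loop1_spec column row 0 (p1 + p0) [] le_rfl]
    have h1 : max 0 (0 + (p1 + p0) - row + 1) = max 0 (p0 + p1 - row + 1) := by omega
    have h2 : min column (0 + (p1 + p0) + 1) = min (column - 1) (p0 + p1) + 1 := by omega
    have h3 : (fun k => [k, 0 + (p1 + p0) - k]) = (fun k => [k, p0 + p1 - k]) := by
      funext k; simp; omega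
    rw [h1, h2, h3]
    simp
  · rw [if_neg hb, if_pos (by omega)]
    rw [diagonal_2_loop2_spec column row (p0 + p1) 0 [] le_rfl]
    have h2 : min (p0 + p1) (column - 1) = min (column - 1) (p0 + p1) := by omega
    simp only [add_zero, h2]
    simp
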